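-- pv_equiv track=rewrite | github.com/Lackyjian/speaker-dairization | ui.py | speaker_naming
-- ===== SOURCE A (Python) =====
-- def speaker_naming(arr, names):
--     speaker = arr
--     name = names
--     li = []
--     for i in speaker:
--         if i not in li:
--             li.append(i)
--     mapping = {}
--     for i in range(len(li)):
--         mapping[li[i]] = name[i]
--     result_list = [mapping[item] for item in speaker]
--     return result_list
-- ===== SOURCE B (Python) =====
-- def speaker_naming(arr, names):
--     # Each speaker's name index is a closed-form rank: the number of distinct
--     # speakers occurring strictly before its first occurrence in arr.
--     return [names[len(set(arr[:arr.index(s)]))] for s in arr]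
-- ===== Notes on version B (the rewrite author's own statement) =====
-- stated objective: alternative
-- what changed: B builds no mapping table at all: each output name is computed independently by a closed-form rank (the number of distinct speakers in the prefix strictly before the element's first occurrence), via a per-element slice/set/index expression, replacing A's staged unique-list + dict construction.
import Mathlib
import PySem

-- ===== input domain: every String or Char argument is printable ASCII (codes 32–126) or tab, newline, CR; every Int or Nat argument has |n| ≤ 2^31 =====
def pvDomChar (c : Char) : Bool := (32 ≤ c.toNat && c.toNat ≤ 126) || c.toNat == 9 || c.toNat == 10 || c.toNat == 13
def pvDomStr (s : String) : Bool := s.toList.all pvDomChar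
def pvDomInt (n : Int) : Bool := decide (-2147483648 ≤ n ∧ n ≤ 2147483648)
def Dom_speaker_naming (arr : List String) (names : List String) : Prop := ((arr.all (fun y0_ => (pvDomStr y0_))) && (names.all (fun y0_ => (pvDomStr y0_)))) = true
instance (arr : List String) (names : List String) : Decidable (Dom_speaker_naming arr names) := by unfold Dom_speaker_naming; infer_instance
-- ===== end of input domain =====

-- One honest line: B drops A's table-building entirely and computes each name by a
-- closed-form rank (distinct speakers before the element's first occurrence); objective: alternative.

-- ===== PORT A =====
def speaker_naming (arr : List String) (names : List String) : List String :=
  -- li = []; for i in speaker: if i not in li: li.append(i)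
  let li : List String := arr.foldl (fun li i => if li.contains i then li else li ++ [i]) []
  -- mapping = {}; for i in range(len(li)): mapping[li[i]] = name[i]
  -- (li[i] / name[i] via pyGetD: in range whenever Python does not raise, i.e. under Pre_)
  let mapping : PySem.Dict String String :=
    (PySem.List.pyRange 0 (li.length : Int) 1).foldl
      (fun m i => m.insert (PySem.List.pyGetD li i "") (PySem.List.pyGetD names i "")) PySem.Dict.empty
  -- [mapping[item] for item in speaker]
  arr.map (fun item => mapping.getD item "")

-- ===== PORT B =====
def speaker_naming_alt (arr : List String) (names : List String) : List String :=
  -- [names[len(set(arr[:arr.index(s)]))] for s in arr]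
  -- arr.index(s) cannot raise here (s is drawn from arr), so .getD 0 is never taken
  arr.map (fun s =>
    PySem.List.pyGetD names
      (((PySem.Set.ofList (PySem.List.slice arr none
          (some ((((PySem.List.index? arr s).getD 0 : Nat) : Int))))).length : Int)) "")

-- ===== PRECONDITION & SPEC =====
-- Pre_ excludes exactly the inputs where Python A raises IndexError: more distinct
-- speakers than names (names[i] out of range); B raises there too.
def Pre_speaker_naming (arr : List String) (names : List String) : Prop :=
  (PySem.Set.ofList arr).length ≤ names.length
instance (arr : List String) (names : List String) : Decidable (Pre_speaker_naming arr names) := by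
  unfold Pre_speaker_naming; infer_instance

def pvWitness_speaker_naming : List String × List String :=
  (["a", "b", "a"], ["Alice", "Bob"])

def Spec_speaker_naming (arr : List String) (names : List String) (out : List String) : Prop := out = speaker_naming_alt arr names
instance (arr : List String) (names : List String) (out : List String) : Decidable (Spec_speaker_naming arr names out) := by unfold Spec_speaker_naming; infer_instance

-- ===== CLAIM (what is proved, stated in full; the proofs are below) =====
def Claim_equal_speaker_naming : Prop := ∀ (arr : List String) (names : List String), Dom_speaker_naming arr names → Pre_speaker_naming arr names → Spec_speaker_naming arr names (speaker_naming arr names)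

-- ===== LEMMAS AND PROOFS =====

-- A's hand-rolled unique-list loop is exactly PySem.Set.ofList
lemma liF_eq_ofList (arr : List String) :
    arr.foldl (fun li i => if li.contains i then li else li ++ [i]) [] = PySem.Set.ofList arr := rfl

lemma range_map_zip (li names : List String) (h : li.length ≤ names.length) :
    (PySem.List.pyRange 0 (li.length : Int) 1).map
        (fun i => (PySem.List.pyGetD li i "", PySem.List.pyGetD names i "")) = li.zip names := by
  rw [PySem.List.pyRange_one]
  simp only [zero_add, Int.sub_zero, Int.toNat_natCast]
  have : ∀ (li names : List String), li.length ≤ names.length →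
      (List.range li.length).map (fun k => (li.getD k "", names.getD k "")) = li.zip names := by
    intro li
    induction li with
    | nil => simp
    | cons a l ih =>
      intro names h
      cases names with
      | nil => simp at h
      | cons n ns =>
        rw [show (a :: l).length = l.length + 1 from rfl, List.range_succ_eq_map]
        simp only [List.map_cons, List.getD_cons_zero, List.map_map, List.zip_cons_cons]
        rw [show ((fun k => ((a :: l).getD k "", (n :: ns).getD k "")) ∘ Nat.succ)
            = (fun k => (l.getD k "", ns.getD k "")) from rfl]
        rw [ih ns (by simpa using h)]
  rw [← this li names h, List.map_map]
  apply List.map_congr_left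
  intro k hk
  simp [PySem.List.pyGetD_natCast]

lemma A_mapping (li names : List String) (hnd : li.Nodup) (h : li.length ≤ names.length) :
    (PySem.List.pyRange 0 (li.length : Int) 1).foldl
      (fun m i => m.insert (PySem.List.pyGetD li i "") (PySem.List.pyGetD names i "")) PySem.Dict.empty
    = PySem.Dict.mk (li.zip names) := by
  apply PySem.Dict.ext
  rw [PySem.Dict.items_foldl_insert_fresh]
  · show [] ++ _ = _
    rw [List.nil_append, range_map_zip li names h]
  · intro a _; exact PySem.Dict.contains_empty _
  · rw [PySem.List.map_pyGetD_pyRange_zero']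
    exact hnd

-- folding Set.add only ever appends: the accumulator is a prefix of the result
lemma foldl_add_prefix (l : List String) : ∀ (acc : List String),
    ∃ t, l.foldl PySem.Set.add acc = acc ++ t := by
  induction l with
  | nil => intro acc; exact ⟨[], by simp⟩
  | cons x r ih =>
    intro acc
    simp only [List.foldl_cons]
    by_cases hx : PySem.Set.contains acc x
    · rw [show PySem.Set.add acc x = acc from by unfold PySem.Set.add; rw [if_pos hx]]
      exact ih acc
    · rw [show PySem.Set.add acc x = acc ++ [x] from by unfold PySem.Set.add; rw [if_neg hx]]
      obtain ⟨t, ht⟩ := ih (acc ++ [x])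
      exact ⟨x :: t, by simpa using ht⟩

-- first-match lookup in the zip dict, when the key first occurs at position p.length
lemma getD_mk_zip (item : String) : ∀ (p t names : List String), item ∉ p → p.length < names.length →
    (PySem.Dict.mk ((p ++ item :: t).zip names)).getD item "" = names.getD p.length "" := by
  intro p
  induction p with
  | nil =>
    intro t names _ hlen
    cases names with
    | nil => simp at hlen
    | cons n ns =>
      simp [PySem.Dict.getD, PySem.Dict.get?_mk_cons]
  | cons a p' ih =>
    intro t names hmem hlen
    cases names with
    | nil => simp at hlen
    | cons n ns =>
      have hne : (a == item) = false := by
        simp only [beq_eq_false_iff_ne, ne_eq]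
        intro h; exact hmem (h ▸ List.mem_cons_self)
      have := ih t ns (fun h => hmem (List.mem_cons_of_mem a h)) (by simpa using hlen)
      simpa [PySem.Dict.getD, PySem.Dict.get?_mk_cons, hne] using this

-- ===== VERDICT (by name: the statement is the Claim_ definition above) =====
theorem speaker_naming_spec : Claim_equal_speaker_naming := by
  intro arr names _ hpre
  unfold Spec_speaker_naming speaker_naming speaker_naming_alt
  dsimp only
  rw [liF_eq_ofList]
  have hnd : (PySem.Set.ofList arr).Nodup := PySem.Set.nodup_ofList arr
  rw [A_mapping _ names hnd hpre]
  apply List.map_congr_left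
  intro item hitem
  -- decompose arr at item's first occurrence
  obtain ⟨k, hk⟩ : ∃ k, PySem.List.index? arr item = some k := by
    rcases Option.isSome_iff_exists.mp ((PySem.List.index?_isSome_iff arr item).mpr hitem) with ⟨k, hk⟩
    exact ⟨k, hk⟩
  obtain ⟨pre, suf, harr, hlen, hpre_mem⟩ := (PySem.List.index?_eq_some_iff arr item k).mp hk
  rw [hk]
  simp only [Option.getD_some]
  rw [PySem.List.slice_to_natCast, ← hlen, harr, List.take_left]
  -- the dedup list splits the same way: Set.ofList arr = Set.ofList pre ++ item :: t
  have hofl : PySem.Set.ofList arr = arr.foldl PySem.Set.add [] := PySem.Set.ofList_eq_foldl arr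
  have hitem_not : item ∉ PySem.Set.ofList pre := by
    rw [PySem.Set.mem_ofList]; exact hpre_mem
  have hp_add : PySem.Set.add (PySem.Set.ofList pre) item = PySem.Set.ofList pre ++ [item] := by
    simp only [PySem.Set.add]
    rw [if_neg (by simpa [PySem.Set.contains, List.contains_eq_mem] using hitem_not)]
  obtain ⟨t, ht⟩ := foldl_add_prefix suf (PySem.Set.ofList pre ++ [item])
  have hsplit : PySem.Set.ofList arr = PySem.Set.ofList pre ++ item :: t := by
    rw [hofl, harr, List.foldl_append, List.foldl_cons,
        ← PySem.Set.ofList_eq_foldl, hp_add, ht, List.append_assoc]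
    rfl
  have hP : (PySem.Set.ofList arr).length ≤ names.length := hpre
  have hlt : (PySem.Set.ofList pre).length < names.length := by
    have : (PySem.Set.ofList pre).length < (PySem.Set.ofList arr).length := by
      rw [hsplit]; simp
    omega
  rw [← harr, hsplit, getD_mk_zip item (PySem.Set.ofList pre) t names hitem_not hlt,
      PySem.List.pyGetD_natCast]
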